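-- pv_equiv track=rewrite | github.com/faalbers/market | market/portfolio/statement/scottrade.py | __trim_lines
-- ===== SOURCE A (Python) =====
-- def __trim_lines(lines, account_number, start_string=None):
--     trim_blocks = []
--     trim_block = []
--     for line in lines:
--         if line.startswith('Page '):
--             trim_blocks.append(trim_block)
--             trim_block = []
--             continue
--         trim_block.append(line)
--     trim_blocks.append(trim_block)
--
--     new_lines = []
--     # add trim blocks together
--     for block in trim_blocks:
--         if start_string is not None and start_string in block:
--             # trim each block with start string if available
--             new_lines += block[block.index(start_string)+1:]
--         else:
--             new_lines += block
--
--     return new_lines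
-- ===== SOURCE B (Python) =====
-- def __trim_lines(lines, account_number, start_string=None):
--     new_lines = []
--     buf = []
--     found = False
--     for line in lines:
--         if line.startswith('Page '):
--             if not found:
--                 new_lines += buf
--             buf = []
--             found = False
--         elif found:
--             new_lines.append(line)
--         elif start_string is not None and line == start_string:
--             found = True
--             buf = []
--         else:
--             buf.append(line)
--     if not found:
--         new_lines += buf
--     return new_lines
-- ===== Notes on version B (the rewrite author's own statement) =====
-- stated objective: alternative
-- what changed: Replaced the two-phase algorithm (build a list of page blocks, then rescan each block with 'in'/.index to trim) by a single pass over the lines maintaining a current-block buffer and a 'found' flag, so the intermediate blocks list and the per-block .index rescan disappear.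
import Mathlib
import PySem

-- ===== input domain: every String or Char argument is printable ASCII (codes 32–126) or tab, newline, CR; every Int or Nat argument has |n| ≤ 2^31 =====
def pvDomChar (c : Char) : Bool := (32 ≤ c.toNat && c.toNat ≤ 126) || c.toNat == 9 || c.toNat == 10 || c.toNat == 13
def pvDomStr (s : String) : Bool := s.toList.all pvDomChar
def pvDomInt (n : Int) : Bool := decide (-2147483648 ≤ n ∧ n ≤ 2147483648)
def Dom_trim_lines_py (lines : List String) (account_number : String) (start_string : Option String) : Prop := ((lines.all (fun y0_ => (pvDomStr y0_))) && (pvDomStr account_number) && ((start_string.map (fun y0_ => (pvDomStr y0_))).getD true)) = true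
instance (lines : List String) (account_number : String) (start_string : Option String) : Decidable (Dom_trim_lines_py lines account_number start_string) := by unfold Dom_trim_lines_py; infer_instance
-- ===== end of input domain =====

-- B replaces A's two phases (collect page blocks, then rescan each with in/.index) by one
-- pass with a current-block buffer and a found flag; alternative decomposition, same result.
-- ===== PORT A =====
def trim_lines_py (lines : List String) (account_number : String) (start_string : Option String) : List String :=
  -- first loop: split into trim_blocks at lines starting with 'Page '
  let st := lines.foldl (fun (st : List (List String) × List String) line =>
    if PySem.Str.startswith line "Page " then (st.1 ++ [st.2], ([] : List String))
    else (st.1, st.2 ++ [line])) ([], [])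
  let trim_blocks := st.1 ++ [st.2]
  -- second loop: concatenate, trimming each block after the first start_string if present
  trim_blocks.foldl (fun acc block =>
    match start_string with
    | some s =>
        if s ∈ block then
          acc ++ PySem.List.slice block (some (((PySem.List.index? block s).getD 0 : Int) + 1)) none
        else acc ++ block
    | none => acc ++ block) []

-- ===== PORT B =====
def trim_lines_py_alt (lines : List String) (account_number : String) (start_string : Option String) : List String :=
  -- single pass: state = (new_lines, buf, found)
  let st := lines.foldl (fun (st : List String × List String × Bool) line =>
    if PySem.Str.startswith line "Page " then
      ((if st.2.2 then st.1 else st.1 ++ st.2.1), ([] : List String), false)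
    else if st.2.2 then (st.1 ++ [line], st.2.1, true)
    else if start_string = some line then (st.1, ([] : List String), true)
    else (st.1, st.2.1 ++ [line], false)) ([], [], false)
  if st.2.2 then st.1 else st.1 ++ st.2.1

-- ===== PRECONDITION & SPEC =====
def Spec_trim_lines_py (lines : List String) (account_number : String) (start_string : Option String) (out : List String) : Prop := out = trim_lines_py_alt lines account_number start_string
instance (lines : List String) (account_number : String) (start_string : Option String) (out : List String) : Decidable (Spec_trim_lines_py lines account_number start_string out) := by unfold Spec_trim_lines_py; infer_instance

-- ===== CLAIM (what is proved, stated in full; the proofs are below) =====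
def Claim_equal_trim_lines_py : Prop := ∀ (lines : List String) (account_number : String) (start_string : Option String), Dom_trim_lines_py lines account_number start_string → Spec_trim_lines_py lines account_number start_string (trim_lines_py lines account_number start_string)

-- ===== LEMMAS AND PROOFS =====

-- emit of a single block, as A's second loop performs it
def pvEmit (ss : Option String) (block : List String) : List String :=
  match ss with
  | some s =>
      if s ∈ block then
        PySem.List.slice block (some (((PySem.List.index? block s).getD 0 : Int) + 1)) none
      else block
  | none => block

-- A's step and B's step as named functions
def pvStepA (st : List (List String) × List String) (line : String) : List (List String) × List String :=
  if PySem.Str.startswith line "Page " then (st.1 ++ [st.2], []) else (st.1, st.2 ++ [line])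

def pvStepB (ss : Option String) (st : List String × List String × Bool) (line : String) :
    List String × List String × Bool :=
  if PySem.Str.startswith line "Page " then
    ((if st.2.2 then st.1 else st.1 ++ st.2.1), [], false)
  else if st.2.2 then (st.1 ++ [line], st.2.1, true)
  else if ss = some line then (st.1, [], true)
  else (st.1, st.2.1 ++ [line], false)

def pvE (ss : Option String) (blocks : List (List String)) : List String :=
  blocks.flatMap (pvEmit ss)

lemma pvEmit_of_not_mem (ss : Option String) (block : List String)
    (h : ∀ s, ss = some s → s ∉ block) : pvEmit ss block = block := by
  cases ss with
  | none => rfl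
  | some s => simp [pvEmit, h s rfl]

lemma pvEmit_first (s : String) (pre post : List String) (h : s ∉ pre) :
    pvEmit (some s) (pre ++ s :: post) = post := by
  have hidx : PySem.List.index? (pre ++ s :: post) s = some pre.length :=
    (PySem.List.index?_eq_some_iff _ _ _).mpr ⟨pre, post, rfl, rfl, h⟩
  have hmem : s ∈ pre ++ s :: post := by simp
  have hcast : ((pre.length : Int) + 1) = ((pre.length + 1 : Nat) : Int) := by push_cast; ring
  simp only [pvEmit, hidx, Option.getD_some, if_pos hmem, hcast,
    PySem.List.slice_from_natCast]
  rw [show pre ++ s :: post = (pre ++ [s]) ++ post by simp]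
  rw [show pre.length + 1 = (pre ++ [s]).length by simp]
  exact List.drop_left

-- the invariant relation between A's state and B's state
def pvRel (ss : Option String) (blocks : List (List String)) (block : List String)
    (out buf : List String) (found : Bool) : Prop :=
  (found = false → out = pvE ss blocks ∧ buf = block ∧ (∀ s, ss = some s → s ∉ block)) ∧
  (found = true → ∃ s pre post, ss = some s ∧ block = pre ++ s :: post ∧ s ∉ pre ∧
      out = pvE ss blocks ++ post)

lemma pvE_append_singleton (ss : Option String) (blocks : List (List String)) (b : List String) :
    pvE ss (blocks ++ [b]) = pvE ss blocks ++ pvEmit ss b := by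
  simp [pvE]

lemma pvMain (ss : Option String) :
    ∀ (lines : List String) (blocks : List (List String)) (block out buf : List String)
      (found : Bool), pvRel ss blocks block out buf found →
    (let stA := lines.foldl pvStepA (blocks, block)
     pvE ss (stA.1 ++ [stA.2])) =
    (let stB := lines.foldl (pvStepB ss) (out, buf, found)
     if stB.2.2 then stB.1 else stB.1 ++ stB.2.1) := by
  intro lines
  induction lines with
  | nil =>
    intro blocks block out buf found hrel
    simp only [List.foldl_nil, pvE_append_singleton]
    cases found with
    | false =>
      obtain ⟨hout, hbuf, hnot⟩ := hrel.1 rfl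
      simp [hout, hbuf, pvEmit_of_not_mem ss block hnot]
    | true =>
      obtain ⟨s, pre, post, hss, hblock, hpre, hout⟩ := hrel.2 rfl
      simp [hout, hblock, hss, pvEmit_first s pre post hpre]
  | cons line rest ih =>
    intro blocks block out buf found hrel
    simp only [List.foldl_cons]
    by_cases hpg : PySem.Str.startswith line "Page " = true
    · -- flush
      have hA : pvStepA (blocks, block) line = (blocks ++ [block], []) := by
        unfold pvStepA; rw [if_pos hpg]
      have hB : pvStepB ss (out, buf, found) line
          = ((if found then out else out ++ buf), [], false) := by
        unfold pvStepB; rw [if_pos hpg]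
      rw [hA, hB]
      apply ih
      refine ⟨fun _ => ⟨?_, rfl, fun s hs => by simp⟩, fun h => by simp at h⟩
      cases found with
      | false =>
        obtain ⟨hout, hbuf, hnot⟩ := hrel.1 rfl
        simp [pvE_append_singleton, hout, hbuf, pvEmit_of_not_mem ss block hnot]
      | true =>
        obtain ⟨s, pre, post, hss, hblock, hpre, hout⟩ := hrel.2 rfl
        simp [pvE_append_singleton, hout, hblock, hss, pvEmit_first s pre post hpre]
    · have hA : pvStepA (blocks, block) line = (blocks, block ++ [line]) := by
        unfold pvStepA; rw [if_neg hpg]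
      rw [hA]
      cases found with
      | true =>
        obtain ⟨s, pre, post, hss, hblock, hpre, hout⟩ := hrel.2 rfl
        have hB : pvStepB ss (out, buf, true) line = (out ++ [line], buf, true) := by
          unfold pvStepB; rw [if_neg hpg]; rfl
        rw [hB]
        apply ih
        refine ⟨fun h => by simp at h, fun _ => ⟨s, pre, post ++ [line], hss, ?_, hpre, ?_⟩⟩
        · simp [hblock]
        · simp [hout]
      | false =>
        obtain ⟨hout, hbuf, hnot⟩ := hrel.1 rfl
        by_cases hss : ss = some line
        · have hB : pvStepB ss (out, buf, false) line = (out, [], true) := by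
            unfold pvStepB; rw [if_neg hpg]; simp [hss]
          rw [hB]
          apply ih
          refine ⟨fun h => by simp at h, fun _ => ⟨line, block, [], hss, rfl, hnot line hss, by simp [hout]⟩⟩
        · have hB : pvStepB ss (out, buf, false) line = (out, buf ++ [line], false) := by
            unfold pvStepB; rw [if_neg hpg]; simp [hss]
          rw [hB]
          apply ih
          refine ⟨fun _ => ⟨hout, by simp [hbuf], fun s hs hmem => ?_⟩, fun h => by simp at h⟩
          rcases List.mem_append.mp hmem with h1 | h1
          · exact hnot s hs h1
          · simp at h1
            exact hss (h1 ▸ hs)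

lemma trim_lines_py_eq_foldA (lines : List String) (account_number : String)
    (ss : Option String) :
    trim_lines_py lines account_number ss =
      (let stA := lines.foldl pvStepA ([], [])
       pvE ss (stA.1 ++ [stA.2])) := by
  simp only [trim_lines_py]
  rw [show (lines.foldl (fun (st : List (List String) × List String) line =>
      if PySem.Str.startswith line "Page " then (st.1 ++ [st.2], ([] : List String))
      else (st.1, st.2 ++ [line])) ([], [])) = lines.foldl pvStepA ([], []) from rfl]
  generalize (lines.foldl pvStepA ([], [])) = st
  have h1 : List.foldl (fun (acc : List String) block =>
      match ss with
      | some s =>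
          if s ∈ block then
            acc ++ PySem.List.slice block (some (((PySem.List.index? block s).getD 0 : Int) + 1))
          else acc ++ block
      | none => acc ++ block) [] (st.1 ++ [st.2])
      = List.foldl (fun acc b => acc ++ pvEmit ss b) [] (st.1 ++ [st.2]) :=
    PySem.List.foldl_congr_mem _ _ _ _
      (by intro acc b _; cases ss <;> simp [pvEmit] <;> split <;> rfl)
  rw [h1, PySem.List.foldl_append_eq_flatMap]
  simp [pvE]

lemma trim_lines_py_alt_eq_foldB (lines : List String) (account_number : String)
    (ss : Option String) :
    trim_lines_py_alt lines account_number ss =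
      (let stB := lines.foldl (pvStepB ss) ([], [], false)
       if stB.2.2 then stB.1 else stB.1 ++ stB.2.1) := rfl

-- ===== VERDICT (by name: the statement is the Claim_ definition above) =====
theorem trim_lines_py_spec : Claim_equal_trim_lines_py := by
  intro lines account_number ss _
  unfold Spec_trim_lines_py
  rw [trim_lines_py_eq_foldA, trim_lines_py_alt_eq_foldB]
  exact pvMain ss lines [] [] [] [] false
    ⟨fun _ => ⟨rfl, rfl, fun s _ => by simp⟩, fun h => by simp at h⟩
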